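-- pv_equiv track=rewrite | github.com/dr-gkang/AnKang | __init__.py | _remove_ankang_style_block
-- ===== SOURCE A (Python) =====
-- def _remove_ankang_style_block(ss: str, begin: str, end: str) -> str:
--     if begin not in ss or end not in ss:
--         return ss
--     out = []
--     i = 0
--     while i < len(ss):
--         j = ss.find(begin, i)
--         if j == -1:
--             out.append(ss[i:])
--             break
--         out.append(ss[i:j])
--         k = ss.find(end, j + len(begin))
--         if k == -1:
--             out.append(ss[j:])
--             break
--         i = k + len(end)
--     return "".join(out).strip()
-- ===== SOURCE B (Python) =====
-- def _remove_ankang_style_block(ss: str, begin: str, end: str) -> str: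
--     if begin not in ss or end not in ss:
--         return ss
--
--     def go(s: str) -> str:
--         pre, sep, rest = s.partition(begin)
--         if not sep:
--             return s
--         _mid, sep2, tail = rest.partition(end)
--         if not sep2:
--             return pre + begin + rest
--         return pre + go(tail)
--
--     return go(ss).strip()
-- ===== Notes on version B (the rewrite author's own statement) =====
-- stated objective: idiomatic
-- what changed: Replaces the index-based while loop with find/join by a recursive decomposition using str.partition on ever-shorter suffixes, concatenating the kept pieces.
-- outside the precondition, e.g. on _remove_ankang_style_block('xay', 'a', ''): A returns 'xy', B raises ValueError; on _remove_ankang_style_block('abc', '', 'b'): A returns 'c', B raises ValueError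
import Mathlib
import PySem

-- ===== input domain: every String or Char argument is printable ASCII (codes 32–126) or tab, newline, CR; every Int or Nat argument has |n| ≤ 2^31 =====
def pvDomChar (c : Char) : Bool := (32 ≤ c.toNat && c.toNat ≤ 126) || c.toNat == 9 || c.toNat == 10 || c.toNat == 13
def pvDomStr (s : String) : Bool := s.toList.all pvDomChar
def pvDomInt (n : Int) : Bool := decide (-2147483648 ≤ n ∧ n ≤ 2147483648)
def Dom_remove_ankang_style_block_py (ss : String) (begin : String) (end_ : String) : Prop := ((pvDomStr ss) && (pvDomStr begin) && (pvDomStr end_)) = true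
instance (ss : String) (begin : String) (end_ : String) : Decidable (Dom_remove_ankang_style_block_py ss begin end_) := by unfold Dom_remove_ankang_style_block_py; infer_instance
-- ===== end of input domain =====

-- B replaces A's index-based while loop (find + list of pieces + join) by a recursive
-- decomposition with str.partition on ever-shorter suffixes; equal return values on Pre_.

-- ===== PORT A =====
-- the while loop of A; fuel only makes the recursion total (under Pre_ the index strictly
-- increases each iteration, so ss.length + 1 steps always suffice)
def pvLoopA (ss bg en : List Char) : Nat → Int → List (List Char) → List (List Char)
  | 0, _, out => out
  | fuel + 1, i, out =>
    if i < (ss.length : Int) then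
      let j := PySem.Chars.findFrom ss bg i
      if j = -1 then out ++ [PySem.Chars.slice ss (some i) none]
      else
        let out1 := out ++ [PySem.Chars.slice ss (some i) (some j)]
        let k := PySem.Chars.findFrom ss en (j + (bg.length : Int))
        if k = -1 then out1 ++ [PySem.Chars.slice ss (some j) none]
        else pvLoopA ss bg en fuel (k + (en.length : Int)) out1
    else out

def remove_ankang_style_block_py (ss : String) (begin : String) (end_ : String) : String :=
  if !PySem.Str.isIn begin ss || !PySem.Str.isIn end_ ss then ss
  else
    String.mk (PySem.Chars.strip (PySem.Chars.join []
      (pvLoopA ss.toList begin.toList end_.toList (ss.toList.length + 1) 0 [])))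

-- ===== PORT B =====
-- s.partition(sep): none exactly where Python raises ValueError (sep = "")
def pvPartition? (s sep : List Char) : Option (List Char × List Char × List Char) :=
  if sep = [] then none
  else if PySem.Chars.find s sep = -1 then some (s, [], [])
  else some (s.take (PySem.Chars.find s sep).toNat, sep,
             s.drop ((PySem.Chars.find s sep).toNat + sep.length))

theorem pvPartition?_length_lt {s sep pre sb rest : List Char}
    (h : pvPartition? s sep = some (pre, sb, rest)) (hsb : sb ≠ []) :
    rest.length < s.length := by
  unfold pvPartition? at h
  split_ifs at h with h1 h2
  · simp only [Option.some.injEq, Prod.mk.injEq] at h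
    exact absurd h.2.1.symm hsb
  · simp only [Option.some.injEq, Prod.mk.injEq] at h
    obtain ⟨-, -, hr⟩ := h
    have hinf : sep <:+: s := (PySem.Chars.find_ne_neg_one_iff s sep).mp h2
    have hlen : sep.length ≤ s.length := hinf.length_le
    have hpos : 0 < sep.length := List.length_pos_iff.mpr h1
    subst hr
    simp only [List.length_drop]
    omega

theorem pvPartition?_length_le {s sep m sb tail : List Char}
    (h : pvPartition? s sep = some (m, sb, tail)) : tail.length ≤ s.length := by
  unfold pvPartition? at h
  split_ifs at h with h1 h2
  · simp only [Option.some.injEq, Prod.mk.injEq] at h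
    obtain ⟨-, -, hr⟩ := h; subst hr; simp
  · simp only [Option.some.injEq, Prod.mk.injEq] at h
    obtain ⟨-, -, hr⟩ := h; subst hr; simp

def pvGo (bg en : List Char) (s : List Char) : List Char :=
  match h1 : pvPartition? s bg with
  | none => s
  | some (pre, sepb, rest) =>
    if hb : sepb = [] then s
    else
      match h2 : pvPartition? rest en with
      | none => s
      | some (_mid, sepe, tail) =>
        if sepe = [] then pre ++ bg ++ rest
        else pre ++ pvGo bg en tail
termination_by s.length
decreasing_by exact lt_of_le_of_lt (pvPartition?_length_le h2) (pvPartition?_length_lt h1 hb)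

def remove_ankang_style_block_py_alt (ss : String) (begin : String) (end_ : String) : String :=
  if !PySem.Str.isIn begin ss || !PySem.Str.isIn end_ ss then ss
  else String.mk (PySem.Chars.strip (pvGo begin.toList end_.toList ss.toList))

-- ===== PRECONDITION & SPEC =====
-- Pre_ excludes an empty begin/end marker only when both markers occur in ss (so the loop is
-- reached): there A diverges (both empty, ss nonempty) or returns a value that is an artefact
-- of find('', i), while B's str.partition raises ValueError; when a marker is absent both
-- versions return ss unchanged, so those inputs stay inside Pre_.
def Pre_remove_ankang_style_block_py (ss : String) (begin : String) (end_ : String) : Prop :=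
  (begin ≠ "" ∧ end_ ≠ "") ∨ PySem.Str.isIn begin ss = false ∨ PySem.Str.isIn end_ ss = false
instance (ss : String) (begin : String) (end_ : String) : Decidable (Pre_remove_ankang_style_block_py ss begin end_) := by unfold Pre_remove_ankang_style_block_py; infer_instance

def pvWitness_remove_ankang_style_block_py : String × String × String := ("a[b]c [d] e", "[", "]")

def Spec_remove_ankang_style_block_py (ss : String) (begin : String) (end_ : String) (out : String) : Prop := out = remove_ankang_style_block_py_alt ss begin end_
instance (ss : String) (begin : String) (end_ : String) (out : String) : Decidable (Spec_remove_ankang_style_block_py ss begin end_ out) := by unfold Spec_remove_ankang_style_block_py; infer_instance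

-- ===== CLAIM (what is proved, stated in full; the proofs are below) =====
def Claim_equal_remove_ankang_style_block_py : Prop := ∀ (ss : String) (begin : String) (end_ : String), Dom_remove_ankang_style_block_py ss begin end_ → Pre_remove_ankang_style_block_py ss begin end_ → Spec_remove_ankang_style_block_py ss begin end_ (remove_ankang_style_block_py ss begin end_)

-- ===== LEMMAS AND PROOFS =====

theorem pvGo_eq (bg en s : List Char) : pvGo bg en s =
    (match pvPartition? s bg with
    | none => s
    | some (pre, sepb, rest) =>
      if sepb = [] then s
      else
        match pvPartition? rest en with
        | none => s
        | some (_mid, sepe, tail) =>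
          if sepe = [] then pre ++ bg ++ rest
          else pre ++ pvGo bg en tail) := by
  rw [pvGo]
  split
  · rename_i heq; simp only [heq]
  · rename_i pre sepb rest heq
    simp only [heq]
    by_cases hb : sepb = []
    · simp [hb]
    · rw [dif_neg hb, if_neg hb]
      split
      · rename_i heq2; simp only [heq2]
      · rename_i m sepe tail heq2; simp only [heq2]

theorem pvGo_not_found {bg en t : List Char} (hbg : bg ≠ [])
    (h : PySem.Chars.find t bg = -1) : pvGo bg en t = t := by
  have hp : pvPartition? t bg = some (t, ([] : List Char), ([] : List Char)) := by
    unfold pvPartition?; rw [if_neg hbg, if_pos h]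
  rw [pvGo_eq, hp]
  simp

theorem pvGo_nil {bg en : List Char} (hbg : bg ≠ []) : pvGo bg en [] = [] := by
  apply pvGo_not_found hbg
  rw [PySem.Chars.find_eq_neg_one_iff]
  intro hinf
  exact hbg (List.eq_nil_of_infix_nil hinf)

theorem pvGo_found {bg en t : List Char} (hbg : bg ≠ []) (hen : en ≠ [])
    (h : ¬ PySem.Chars.find t bg = -1) :
    pvGo bg en t =
      (if PySem.Chars.find (t.drop ((PySem.Chars.find t bg).toNat + bg.length)) en = -1 then
        t.take (PySem.Chars.find t bg).toNat ++ bg ++ t.drop ((PySem.Chars.find t bg).toNat + bg.length)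
      else
        t.take (PySem.Chars.find t bg).toNat ++
          pvGo bg en ((t.drop ((PySem.Chars.find t bg).toNat + bg.length)).drop
            ((PySem.Chars.find (t.drop ((PySem.Chars.find t bg).toNat + bg.length)) en).toNat + en.length))) := by
  have hp : pvPartition? t bg = some (t.take (PySem.Chars.find t bg).toNat, bg,
      t.drop ((PySem.Chars.find t bg).toNat + bg.length)) := by
    unfold pvPartition?; rw [if_neg hbg, if_neg h]
  rw [pvGo_eq]
  simp only [hp]
  rw [if_neg hbg]
  by_cases h2 : PySem.Chars.find (t.drop ((PySem.Chars.find t bg).toNat + bg.length)) en = -1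
  · have hp2 : pvPartition? (t.drop ((PySem.Chars.find t bg).toNat + bg.length)) en =
        some (t.drop ((PySem.Chars.find t bg).toNat + bg.length), [], []) := by
      unfold pvPartition?; rw [if_neg hen, if_pos h2]
    simp only [hp2, h2]
    simp
  · have hp2 : pvPartition? (t.drop ((PySem.Chars.find t bg).toNat + bg.length)) en =
        some ((t.drop ((PySem.Chars.find t bg).toNat + bg.length)).take
            (PySem.Chars.find (t.drop ((PySem.Chars.find t bg).toNat + bg.length)) en).toNat, en,
          (t.drop ((PySem.Chars.find t bg).toNat + bg.length)).drop
            ((PySem.Chars.find (t.drop ((PySem.Chars.find t bg).toNat + bg.length)) en).toNat + en.length)) := by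
      unfold pvPartition?; rw [if_neg hen, if_neg h2]
    simp only [hp2, h2]
    rw [if_neg hen]
    simp

theorem pvJoinNilFlatten (l : List (List Char)) : PySem.Chars.join [] l = l.flatten := by
  induction l with
  | nil => rfl
  | cons a t ih =>
    cases t with
    | nil => rw [PySem.Chars.join_singleton]; simp
    | cons b t2 => rw [PySem.Chars.join_cons_cons]; simp_all

theorem pvDrop2 (l : List Char) (a b c : Nat) (h : a + b = c) :
    List.drop b (List.drop a l) = List.drop c l := by
  rw [List.drop_drop, h]

theorem pvLoopA_flatten (ss bg en : List Char) (hbg : bg ≠ []) (hen : en ≠ []) :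
    ∀ (fuel i : Nat) (out : List (List Char)), i ≤ ss.length → ss.length + 1 ≤ fuel + i →
    (pvLoopA ss bg en fuel (i : Int) out).flatten = out.flatten ++ pvGo bg en (ss.drop i) := by
  intro fuel
  induction fuel with
  | zero => intro i out hi hf; omega
  | succ fuel ih =>
    intro i out hi hf
    rw [pvLoopA]
    by_cases hlt : (i : Int) < (ss.length : Int)
    · rw [if_pos hlt]
      rw [PySem.Chars.findFrom_natCast ss bg i hi]
      by_cases hA : PySem.Chars.find (ss.drop i) bg = -1
      · rw [if_pos hA, if_pos rfl, pvGo_not_found hbg hA]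
        simp [PySem.List.slice_from_natCast]
      · -- begin found at index i + jn in ss (jn = find in the suffix t := ss.drop i)
        have hj0 : 0 ≤ PySem.Chars.find (ss.drop i) bg := by
          have := PySem.Chars.neg_one_le_find (ss.drop i) bg
          omega
        have hjn : ((PySem.Chars.find (ss.drop i) bg).toNat : Int) = PySem.Chars.find (ss.drop i) bg :=
          Int.toNat_of_nonneg hj0
        set jn := (PySem.Chars.find (ss.drop i) bg).toNat with hjndef
        have hpre : bg <+: (ss.drop i).drop jn := (PySem.Chars.find_spec hj0).1
        have htlen : (ss.drop i).length = ss.length - i := by simp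
        have hlb : jn + bg.length ≤ (ss.drop i).length := by
          have h1 := hpre.length_le
          have h2 : ((ss.drop i).drop jn).length = (ss.drop i).length - jn := by
            simp only [List.length_drop]
          have h3 : jn ≤ (ss.drop i).length := by
            by_contra hcon
            push_neg at hcon
            rw [List.drop_eq_nil_of_le (le_of_lt hcon)] at hpre
            exact hbg (List.prefix_nil.mp hpre)
          omega
        rw [if_neg hA, if_neg (by omega : ¬ ((i : Int) + PySem.Chars.find (ss.drop i) bg = -1))]
        rw [show (i : Int) + PySem.Chars.find (ss.drop i) bg = ((i + jn : Nat) : Int) by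
          push_cast [hjn]; ring]
        rw [show ((i + jn : Nat) : Int) + (bg.length : Int) = ((i + jn + bg.length : Nat) : Int) by
          push_cast; ring]
        rw [PySem.Chars.findFrom_natCast ss en (i + jn + bg.length) (by omega)]
        have hdd1 : (ss.drop i).drop (jn + bg.length) = ss.drop (i + jn + bg.length) :=
          pvDrop2 ss i (jn + bg.length) (i + jn + bg.length) (by omega)
        have hx : List.drop jn (List.drop i ss) = List.drop (i + jn) ss :=
          pvDrop2 ss i jn (i + jn) rfl
        obtain ⟨u, hu⟩ := hpre
        have hsplit : ss.drop (i + jn) = bg ++ ss.drop (i + jn + bg.length) := by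
          have hy : List.drop (jn + bg.length) (List.drop i ss)
              = List.drop bg.length (List.drop jn (List.drop i ss)) := by
            rw [hx, pvDrop2 ss i (jn + bg.length) (i + jn + bg.length) (by omega),
              pvDrop2 ss (i + jn) bg.length (i + jn + bg.length) rfl]
          rw [← hx, ← hdd1, hy, ← hu, List.drop_left]
        by_cases hB : PySem.Chars.find (ss.drop (i + jn + bg.length)) en = -1
        · rw [if_pos hB, if_pos rfl]
          rw [pvGo_found hbg hen hA, ← hjndef, hdd1, if_pos hB]
          simp only [PySem.Chars.slice_eq_listSlice, PySem.List.slice_natCast,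
            PySem.List.slice_from_natCast, List.flatten_append, List.flatten_cons,
            List.flatten_nil, List.append_nil, List.append_assoc]
          rw [hsplit, show i + jn - i = jn from by omega]
        · -- end found: continue past it, as the recursion does on the remaining tail
          have hk0 : 0 ≤ PySem.Chars.find (ss.drop (i + jn + bg.length)) en := by
            have := PySem.Chars.neg_one_le_find (ss.drop (i + jn + bg.length)) en
            omega
          have hkn : ((PySem.Chars.find (ss.drop (i + jn + bg.length)) en).toNat : Int)
              = PySem.Chars.find (ss.drop (i + jn + bg.length)) en := Int.toNat_of_nonneg hk0
          set kn := (PySem.Chars.find (ss.drop (i + jn + bg.length)) en).toNat with hkndef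
          have hpre2 : en <+: (ss.drop (i + jn + bg.length)).drop kn := (PySem.Chars.find_spec hk0).1
          have hlb2 : kn + en.length ≤ (ss.drop (i + jn + bg.length)).length := by
            have h1 := hpre2.length_le
            have h2 : ((ss.drop (i + jn + bg.length)).drop kn).length
                = (ss.drop (i + jn + bg.length)).length - kn := by
              simp only [List.length_drop]
            have h3 : kn ≤ (ss.drop (i + jn + bg.length)).length := by
              by_contra hcon
              push_neg at hcon
              rw [List.drop_eq_nil_of_le (le_of_lt hcon)] at hpre2
              exact hen (List.prefix_nil.mp hpre2)
            omega
          have hrlen : (ss.drop (i + jn + bg.length)).length = ss.length - (i + jn + bg.length) := by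
            simp only [List.length_drop]
          have hbp : 0 < bg.length := List.length_pos_iff.mpr hbg
          rw [if_neg hB, if_neg (by omega :
            ¬ (((i + jn + bg.length : Nat) : Int) + PySem.Chars.find (ss.drop (i + jn + bg.length)) en = -1))]
          rw [show ((i + jn + bg.length : Nat) : Int) + PySem.Chars.find (ss.drop (i + jn + bg.length)) en
                + (en.length : Int) = ((i + jn + bg.length + kn + en.length : Nat) : Int) by
            push_cast [hkn]; ring]
          rw [ih (i + jn + bg.length + kn + en.length) _ (by omega) (by omega)]
          rw [pvGo_found hbg hen hA, ← hjndef, hdd1, if_neg hB, ← hkndef]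
          rw [pvDrop2 ss (i + jn + bg.length) (kn + en.length)
            (i + jn + bg.length + kn + en.length) (by omega)]
          simp only [PySem.Chars.slice_eq_listSlice, PySem.List.slice_natCast,
            List.flatten_append, List.flatten_cons, List.flatten_nil, List.append_nil,
            List.append_assoc, show i + jn - i = jn from by omega]
    · rw [if_neg hlt]
      have hieq : i = ss.length := by omega
      rw [hieq, List.drop_length, pvGo_nil hbg, List.append_nil]

-- ===== VERDICT (by name: the statement is the Claim_ definition above) =====
theorem remove_ankang_style_block_py_spec : Claim_equal_remove_ankang_style_block_py := by
  intro ss begin end_ _hdom hpre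
  unfold Spec_remove_ankang_style_block_py remove_ankang_style_block_py remove_ankang_style_block_py_alt
  by_cases hg : (!PySem.Str.isIn begin ss || !PySem.Str.isIn end_ ss) = true
  · rw [if_pos hg, if_pos hg]
  · have hgi : PySem.Str.isIn begin ss = true ∧ PySem.Str.isIn end_ ss = true := by
      simp only [Bool.or_eq_true, Bool.not_eq_eq_eq_not, Bool.not_true] at hg
      rcases Bool.eq_false_or_eq_true (PySem.Str.isIn begin ss) with h1 | h1 <;>
        rcases Bool.eq_false_or_eq_true (PySem.Str.isIn end_ ss) with h2 | h2 <;>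
        simp_all
    obtain ⟨hb, he⟩ : begin ≠ "" ∧ end_ ≠ "" := by
      rcases hpre with h | h | h
      · exact h
      · rw [hgi.1] at h; cases h
      · rw [hgi.2] at h; cases h
    have hbg : begin.toList ≠ [] := by
      intro h
      exact hb (by cases begin; simp_all)
    have hen : end_.toList ≠ [] := by
      intro h
      exact he (by cases end_; simp_all)
    rw [if_neg hg, if_neg hg]
    congr 2
    rw [pvJoinNilFlatten]
    have h0 := pvLoopA_flatten ss.toList begin.toList end_.toList hbg hen
      (ss.toList.length + 1) 0 [] (by omega) (by omega)
    simpa using h0
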